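-- pv_equiv track=rewrite | github.com/GammA-su/sovereign | src/sovereidolon_v1/codepatch/breaker.py | _hunk_ranges
-- ===== SOURCE A (Python) =====
-- from typing import Dict, Iterable, List, Optional
--
-- def _hunk_ranges(lines: List[str]) -> List[tuple[int, int]]:
--     ranges: List[tuple[int, int]] = []
--     idx = 0
--     while idx < len(lines):
--         if lines[idx].startswith("@@ "):
--             start = idx
--             idx += 1
--             while idx < len(lines) and not lines[idx].startswith(
--                 "@@ "
--             ) and not lines[idx].startswith("--- "):
--                 idx += 1
--             ranges.append((start, idx))
--         else:
--             idx += 1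
--     return ranges
-- ===== SOURCE B (Python) =====
-- def _hunk_ranges(lines):
--     # Phase 1: index every boundary line (a line that can start or terminate a hunk).
--     boundaries = [(i, ln) for i, ln in enumerate(lines)
--                   if ln.startswith("@@ ") or ln.startswith("--- ")]
--     # Phase 2: each "@@ " boundary opens a hunk that runs to the next boundary (or EOF).
--     ranges = []
--     for k, (i, ln) in enumerate(boundaries):
--         if ln.startswith("@@ "):
--             end = boundaries[k + 1][0] if k + 1 < len(boundaries) else len(lines)
--             ranges.append((i, end))
--     return ranges
-- ===== Notes on version B (the rewrite author's own statement) =====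
-- stated objective: alternative
-- what changed: Replaces A's inline two-level while-loop state machine over indices with two separate phases: build a table of all boundary line indices once, then emit (start, next-boundary-or-EOF) for each '@@ ' entry of that table.
import Mathlib
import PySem

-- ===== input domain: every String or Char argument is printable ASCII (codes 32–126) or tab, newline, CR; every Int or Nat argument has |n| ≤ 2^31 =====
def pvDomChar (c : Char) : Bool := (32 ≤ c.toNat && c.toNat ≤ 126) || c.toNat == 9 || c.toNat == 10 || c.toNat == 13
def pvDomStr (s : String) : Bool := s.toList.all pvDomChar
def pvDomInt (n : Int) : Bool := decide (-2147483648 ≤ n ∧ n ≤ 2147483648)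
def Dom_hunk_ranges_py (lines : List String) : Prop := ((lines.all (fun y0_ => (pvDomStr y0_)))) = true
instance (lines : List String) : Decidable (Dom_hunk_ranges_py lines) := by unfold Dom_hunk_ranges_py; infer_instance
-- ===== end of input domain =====

-- B replaces A's inline two-level while-loop state machine with two phases: a boundary-index
-- table built once, then one lookup of the next boundary per "@@ " entry (objective: alternative).

-- ===== PORT A =====
-- inner while loop: advance idx until end of lines or a line starting with "@@ " or "--- "
def hrA_inner (lines : List String) (idx : Nat) : Nat :=
  if h : idx < lines.length then
    if !(PySem.Str.startswith lines[idx] "@@ ") && !(PySem.Str.startswith lines[idx] "--- ") then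
      hrA_inner lines (idx + 1)
    else idx
  else idx
termination_by lines.length - idx

theorem hrA_inner_ge (lines : List String) (idx : Nat) : idx ≤ hrA_inner lines idx := by
  fun_induction hrA_inner with
  | case1 idx h hb ih => omega
  | case2 idx h hb => omega
  | case3 idx h => omega

-- outer while loop
def hrA_outer (lines : List String) (idx : Nat) (ranges : List (Int × Int)) : List (Int × Int) :=
  if h : idx < lines.length then
    if PySem.Str.startswith lines[idx] "@@ " then
      let start := idx
      let j := hrA_inner lines (idx + 1)
      hrA_outer lines j (ranges ++ [((start : Int), (j : Int))])
    else
      hrA_outer lines (idx + 1) ranges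
  else ranges
termination_by lines.length - idx
decreasing_by
  · have := hrA_inner_ge lines (idx + 1); omega
  · omega

def hunk_ranges_py (lines : List String) : List (Int × Int) :=
  hrA_outer lines 0 []

-- ===== PORT B =====
-- Phase-2 loop of Source B: walk the boundary table; each "@@ " entry yields (index, next boundary index or len(lines))
def hrB_loop (n : Nat) : List (Int × String) → List (Int × Int)
  | [] => []
  | (i, ln) :: rest =>
    (if PySem.Str.startswith ln "@@ " then
       [(i, (match rest with | [] => (n : Int) | (j, _) :: _ => j))]
     else []) ++ hrB_loop n rest

def hunk_ranges_py_alt (lines : List String) : List (Int × Int) :=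
  -- Phase 1 of Source B: boundaries = [(i, ln) for i, ln in enumerate(lines) if …]
  let boundaries := (PySem.List.enumerate lines).filter
    (fun p => PySem.Str.startswith p.2 "@@ " || PySem.Str.startswith p.2 "--- ")
  hrB_loop lines.length boundaries

-- ===== PRECONDITION & SPEC =====
def Spec_hunk_ranges_py (lines : List String) (out : List (Int × Int)) : Prop := out = hunk_ranges_py_alt lines
instance (lines : List String) (out : List (Int × Int)) : Decidable (Spec_hunk_ranges_py lines out) := by unfold Spec_hunk_ranges_py; infer_instance

-- ===== CLAIM (what is proved, stated in full; the proofs are below) =====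
def Claim_equal_hunk_ranges_py : Prop := ∀ (lines : List String), Dom_hunk_ranges_py lines → Spec_hunk_ranges_py lines (hunk_ranges_py lines)

-- ===== LEMMAS AND PROOFS =====

-- boundary predicate
def pvIsB (s : String) : Bool := PySem.Str.startswith s "@@ " || PySem.Str.startswith s "--- "

-- enumerate-then-filter, structurally
def pvEF : List String → Int → List (Int × String)
  | [], _ => []
  | x :: xs, s => (if pvIsB x then [(s, x)] else []) ++ pvEF xs (s + 1)

theorem pvEF_eq_filter (xs : List String) (s : Int) :
    (PySem.List.enumerate xs s).filter (fun p => pvIsB p.2) = pvEF xs s := by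
  induction xs generalizing s with
  | nil => simp [pvEF, PySem.List.enumerate_nil]
  | cons x xs ih =>
    simp only [PySem.List.enumerate_cons, List.filter_cons, pvEF]
    by_cases h : pvIsB x <;> simp [h, ih]

-- boundary table of the suffix starting at index j
def pvBnds (lines : List String) (j : Nat) : List (Int × String) := pvEF (lines.drop j) (j : Int)

theorem pvBnds_end (lines : List String) (j : Nat) (h : lines.length ≤ j) :
    pvBnds lines j = [] := by
  simp [pvBnds, List.drop_eq_nil_of_le h, pvEF]

theorem pvBnds_lt (lines : List String) (j : Nat) (h : j < lines.length) :
    pvBnds lines j = (if pvIsB lines[j] then [((j : Int), lines[j])] else []) ++ pvBnds lines (j + 1) := by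
  have hd : lines.drop j = lines[j] :: lines.drop (j + 1) := List.drop_eq_getElem_cons h
  simp only [pvBnds, hd, pvEF]
  norm_num

theorem hrA_inner_le (lines : List String) (idx : Nat) (h : idx ≤ lines.length) :
    hrA_inner lines idx ≤ lines.length := by
  fun_induction hrA_inner with
  | case1 idx h hb ih => exact ih (by omega)
  | case2 idx h hb => omega
  | case3 idx h => omega

-- the inner loop lands exactly on the head of the remaining boundary table (or at the end)
-- the inner loop lands exactly on the head of the remaining boundary table (or at the end)
theorem hrA_inner_bnds (lines : List String) (idx : Nat) (hle : idx ≤ lines.length) :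
    pvBnds lines (hrA_inner lines idx) = pvBnds lines idx ∧
      (match pvBnds lines idx with
        | [] => hrA_inner lines idx = lines.length
        | (i, _) :: _ => i = (hrA_inner lines idx : Int)) := by
  fun_induction hrA_inner with
  | case1 idx hlt hb ih =>
    simp only [Bool.and_eq_true, Bool.not_eq_true'] at hb
    have hP : pvIsB lines[idx] = false := by
      unfold pvIsB; rw [hb.1, hb.2]; rfl
    have heq : pvBnds lines idx = pvBnds lines (idx + 1) := by
      rw [pvBnds_lt lines idx hlt, hP]; simp
    rw [heq]; exact ih (by omega)
  | case2 idx hlt hb =>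
    have hP : pvIsB lines[idx] = true := by
      unfold pvIsB
      cases hS : PySem.Str.startswith lines[idx] "@@ " <;>
        cases hT : PySem.Str.startswith lines[idx] "--- " <;>
          rw [hS, hT] at hb <;> first | rfl | (exact absurd rfl hb)
    refine ⟨rfl, ?_⟩
    rw [pvBnds_lt lines idx hlt, hP]
    simp
  | case3 idx hlt =>
    have : idx = lines.length := by omega
    subst this
    exact ⟨rfl, by rw [pvBnds_end lines lines.length (le_refl _)]⟩

-- main invariant: the outer loop from j produces exactly B's phase-2 pass over the remaining table
theorem hrA_outer_eq (lines : List String) (j : Nat) (hle : j ≤ lines.length) (acc : List (Int × Int)) :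
    hrA_outer lines j acc = acc ++ hrB_loop lines.length (pvBnds lines j) := by
  fun_induction hrA_outer with
  | case1 j acc hlt hs start j' ih =>
    have hj'le : j' ≤ lines.length := hrA_inner_le lines (j + 1) (by omega)
    obtain ⟨hb1, hb2⟩ := hrA_inner_bnds lines (j + 1) (by omega)
    have hP : pvIsB lines[j] = true := by unfold pvIsB; rw [hs]; rfl
    rw [ih hj'le, pvBnds_lt lines j hlt, hP]
    simp only [List.singleton_append, hrB_loop, hs, if_pos]
    rw [hb1, List.append_assoc]
    congr 2
    cases hc : pvBnds lines (j + 1) with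
    | nil =>
      rw [hc] at hb2; simp at hb2
      simp
      exact ⟨rfl, hb2⟩
    | cons p rest =>
      obtain ⟨i, ln⟩ := p
      rw [hc] at hb2; simp at hb2
      simp [hb2]
      exact ⟨rfl, rfl⟩
  | case2 j acc hlt hs ih =>
    rw [ih (by omega), pvBnds_lt lines j hlt]
    by_cases hP : pvIsB lines[j]
    · simp only [hP, if_pos, List.singleton_append, hrB_loop, hs]
      simp
    · simp [hP]
  | case3 j acc hlt =>
    rw [pvBnds_end lines j (by omega)]
    simp [hrB_loop]

-- ===== VERDICT (by name: the statement is the Claim_ definition above) =====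
theorem hunk_ranges_py_spec : Claim_equal_hunk_ranges_py := by
  intro lines _
  show hunk_ranges_py lines = hunk_ranges_py_alt lines
  unfold hunk_ranges_py hunk_ranges_py_alt
  rw [hrA_outer_eq lines 0 (by omega) []]
  have : pvBnds lines 0 = pvEF lines 0 := by simp [pvBnds]
  rw [this, ← pvEF_eq_filter]
  rfl
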